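-- pv_equiv track=rewrite | github.com/jguhlin/nn-replicon-identification | generate_kmer_embeddings.v2.py | get_kmers_from_seq
-- ===== SOURCE A (Python) =====
-- import functools
--
-- k = 9
--
-- def partition(n, step, coll):
--     for i in range(0, len(coll), step):
--         if (i+n > len(coll)):
--             break #  raise StopIteration...
--         yield coll[i:i+n]
--
-- def get_kmers(k):
--     return lambda sequence: partition(k, k, sequence)
--
-- def convert_nt(c):
--     return {"N": 0, "A": 1, "C": 2, "T": 3, "G": 4}.get(c, 0)
--
-- def convert_kmer_to_int(kmer):
--     return int(''.join(str(x) for x in (map(convert_nt, kmer))), 5)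
--
-- def kmer_processor(seq,offset):
--     return list(map(convert_kmer_to_int, get_kmers(k)(seq[offset:])))
--
-- def get_kmers_from_seq(sequence):
--     kmers_from_seq = list()
--
--     kp = functools.partial(kmer_processor, sequence)
--
--     for i in map(kp, range(0,k)):
--         kmers_from_seq.append(i)
--
--     rev = sequence[::-1]
--     kpr = functools.partial(kmer_processor, rev)
--
--     for i in map(kpr, range(0,k)):
--         kmers_from_seq.append(i)
--
-- #    for i in range(0,k):
-- #        kmers_from_seq.append(kmer_processor(sequence,i))
-- #    for i in range(0,k):
-- #        kmers_from_seq.append(kmer_processor(rev, i))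
--     return kmers_from_seq
-- ===== SOURCE B (Python) =====
-- def get_kmers_from_seq(sequence):
--     # Prefix-hash re-implementation: one O(n) pass builds base-5 prefix hashes,
--     # each window value is H[p+9] - H[p]*5**9; groups are strided comprehensions.
--     k = 9
--     code = {"N": 0, "A": 1, "C": 2, "T": 3, "G": 4}
--
--     def groups(s):
--         n = len(s)
--         H = [0] * (n + 1)
--         for i in range(n):
--             H[i + 1] = H[i] * 5 + code.get(s[i], 0)
--         pk = 5 ** k
--         vals = [H[p + k] - H[p] * pk for p in range(0, n - k + 1)]
--         return [[vals[p] for p in range(o, n - k + 1, k)] for o in range(k)]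
--
--     return groups(sequence) + groups(sequence[::-1])
-- ===== Notes on version B (the rewrite author's own statement) =====
-- stated objective: faster
-- what changed: A builds, for each of 18 offsets, every 9-chunk as a string of digit characters and re-parses it with int(_,5); B makes one O(n) pass per strand computing base-5 prefix hashes and reads every window value off as H[p+9]-H[p]*5**9, distributing them into the offset groups by strided comprehensions.
import Mathlib
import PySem

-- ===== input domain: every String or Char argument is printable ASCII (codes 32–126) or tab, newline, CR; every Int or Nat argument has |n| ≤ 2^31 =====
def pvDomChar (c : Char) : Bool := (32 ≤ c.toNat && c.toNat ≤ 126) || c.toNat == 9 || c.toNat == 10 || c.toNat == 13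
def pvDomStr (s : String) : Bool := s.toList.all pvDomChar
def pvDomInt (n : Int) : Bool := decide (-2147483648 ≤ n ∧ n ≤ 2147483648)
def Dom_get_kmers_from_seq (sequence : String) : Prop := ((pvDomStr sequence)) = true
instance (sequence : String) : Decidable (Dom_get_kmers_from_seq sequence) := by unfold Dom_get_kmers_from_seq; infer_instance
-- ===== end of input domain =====

-- B replaces A's per-window digit-string building and base-5 parsing by one prefix-hash
-- pass (H[p+9] - H[p]*5^9 per window) with strided group comprehensions; return value only.

-- ===== PORT A =====

-- {"N":0,"A":1,"C":2,"T":3,"G":4}.get(c,0): an if-chain is exact (distinct one-char keys)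
def convert_nt (c : Char) : Int :=
  if c = 'N' then 0 else if c = 'A' then 1 else if c = 'C' then 2
  else if c = 'T' then 3 else if c = 'G' then 4 else 0

-- int(s, 5), ported by hand as the base-5 digit fold: exact for nonempty strings of the
-- digits '0'..'4' with no sign/whitespace/underscore — the only strings A ever parses
-- (each joined piece is str(convert_nt(c)) ∈ {"0",…,"4"} and kmers have length 9 > 0).
def intBase5 (cs : List Char) : Int :=
  cs.foldl (fun a c => a * 5 + ((c.toNat : Int) - 48)) 0

-- int(''.join(str(x) for x in map(convert_nt, kmer)), 5)
def convert_kmer_to_int (kmer : List Char) : Int :=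
  intBase5 ((kmer.map convert_nt).foldl (fun acc d => acc ++ PySem.Int.toChars d) [])

-- the generator 'partition(n, step, coll)': for i in range(0, len(coll), step), break when i+n > len
def partitionGo (n : Int) (coll : List Char) : List Int → List (List Char)
  | [] => []
  | i :: rest =>
      if i + n > (coll.length : Int) then []
      else PySem.List.slice coll (some i) (some (i + n)) :: partitionGo n coll rest

def partitionA (n step : Int) (coll : List Char) : List (List Char) :=
  partitionGo n coll (PySem.List.pyRange 0 (coll.length : Int) step)

-- kmer_processor(seq, offset): list(map(convert_kmer_to_int, partition(9, 9, seq[offset:])))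
def kmer_processor (seq : List Char) (offset : Int) : List Int :=
  (partitionA 9 9 (PySem.List.slice seq (some offset) none)).map convert_kmer_to_int

def get_kmers_from_seq (sequence : String) : List (List Int) :=
  let cs := sequence.toList
  let fwd := (PySem.List.pyRange 0 9 1).map (fun i => kmer_processor cs i)
  let rev := cs.reverse           -- sequence[::-1]
  let bwd := (PySem.List.pyRange 0 9 1).map (fun i => kmer_processor rev i)
  fwd ++ bwd

-- ===== PORT B =====

-- code.get(c, 0) in Source B
def codeB (c : Char) : Int :=
  if c = 'N' then 0 else if c = 'A' then 1 else if c = 'C' then 2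
  else if c = 'T' then 3 else if c = 'G' then 4 else 0

-- the H-filling loop H[i+1] = H[i]*5 + code.get(s[i],0), a left scan from H[0] = 0
def prefixH (s : List Char) : List Int :=
  List.scanl (fun h c => h * 5 + codeB c) 0 s

def groupsB (s : List Char) : List (List Int) :=
  let n : Int := (s.length : Int)
  let H := prefixH s
  let pk : Int := 5 ^ 9
  let vals := (PySem.List.pyRange 0 (n - 9 + 1) 1).map
      (fun p => H.getD (p + 9).toNat 0 - H.getD p.toNat 0 * pk)
  (PySem.List.pyRange 0 9 1).map
      (fun o => (PySem.List.pyRange o (n - 9 + 1) 9).map (fun p => vals.getD p.toNat 0))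

def get_kmers_from_seq_alt (sequence : String) : List (List Int) :=
  groupsB sequence.toList ++ groupsB sequence.toList.reverse

-- ===== PRECONDITION & SPEC =====
def Spec_get_kmers_from_seq (sequence : String) (out : List (List Int)) : Prop := out = get_kmers_from_seq_alt sequence
instance (sequence : String) (out : List (List Int)) : Decidable (Spec_get_kmers_from_seq sequence out) := by unfold Spec_get_kmers_from_seq; infer_instance

-- ===== CLAIM (what is proved, stated in full; the proofs are below) =====
def Claim_equal_get_kmers_from_seq : Prop := ∀ (sequence : String), Dom_get_kmers_from_seq sequence → Spec_get_kmers_from_seq sequence (get_kmers_from_seq sequence)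


-- ===== LEMMAS AND PROOFS =====

-- the common window value: base-5 fold over the 9 characters starting at position p
def winVal (cs : List Char) (p : Nat) : Int :=
  ((cs.drop p).take 9).foldl (fun a c => a * 5 + codeB c) 0

-- the canonical group: window values at positions ≡ o (mod 9), starting at o, in order
def canonGroup (cs : List Char) (o : Int) : List Int :=
  (PySem.List.pyRange o ((cs.length : Int) - 9 + 1) 9).map (fun p => winVal cs p.toNat)

lemma pyRange9_nil (a b : Int) (h : b ≤ a) : PySem.List.pyRange a b 9 = [] := by
  rw [PySem.List.pyRange_of_pos _ _ (by norm_num)]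
  simp [show ¬ a < b by omega]

lemma pyRange9_cons (a b : Int) (h : a < b) :
    PySem.List.pyRange a b 9 = a :: PySem.List.pyRange (a + 9) b 9 := by
  rw [PySem.List.pyRange_of_pos _ _ (by norm_num), PySem.List.pyRange_of_pos _ _ (by norm_num)]
  have hN : ((b - a + 9 - 1) / 9).toNat
      = (if a + 9 < b then ((b - (a + 9) + 9 - 1) / 9).toNat else 0) + 1 := by
    split_ifs <;> omega
  rw [if_pos h, hN, List.range_succ_eq_map]
  simp only [List.map_cons, List.map_map, Nat.cast_zero, mul_zero, add_zero]
  congr 1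
  apply List.map_congr_left
  intro k _
  simp [Function.comp]
  ring

-- folding the base-5 parser over str(d) for the single digit d = convert_nt c
lemma foldl_toChars_digit (c : Char) (a : Int) :
    (PySem.Int.toChars (convert_nt c)).foldl (fun a c => a * 5 + ((c.toNat : Int) - 48)) a
      = a * 5 + convert_nt c := by
  unfold convert_nt
  split_ifs <;>
    norm_num [PySem.Int.toChars, List.foldl,
      show Nat.toDigits 10 1 = ['1'] from by decide,
      show Nat.toDigits 10 ((2:Int).toNat) = ['2'] from by decide,
      show Nat.toDigits 10 ((3:Int).toNat) = ['3'] from by decide,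
      show Nat.toDigits 10 ((4:Int).toNat) = ['4'] from by decide,
      show '0'.toNat = 48 from rfl, show '1'.toNat = 49 from rfl,
      show '2'.toNat = 50 from rfl, show '3'.toNat = 51 from rfl,
      show '4'.toNat = 52 from rfl]

lemma intBase5_join (km : List Char) (a : Int) :
    ((km.map convert_nt).foldl (fun acc d => acc ++ PySem.Int.toChars d) []).foldl
        (fun a c => a * 5 + ((c.toNat : Int) - 48)) a
      = km.foldl (fun a c => a * 5 + codeB c) a := by
  rw [PySem.List.foldl_append_eq_flatMap, List.nil_append]
  induction km generalizing a with
  | nil => rfl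
  | cons c km ih =>
      simp only [List.map_cons, List.flatMap_cons, List.foldl_append, List.foldl_cons,
        foldl_toChars_digit]
      exact ih _

lemma convert_kmer_eq (km : List Char) :
    convert_kmer_to_int km = km.foldl (fun a c => a * 5 + codeB c) 0 := by
  unfold convert_kmer_to_int intBase5
  exact intBase5_join km 0

-- pulling the accumulator out of the base-5 fold
lemma foldl_base5_shift (l : List Char) (a : Int) :
    l.foldl (fun a c => a * 5 + codeB c) a
      = a * 5 ^ l.length + l.foldl (fun a c => a * 5 + codeB c) 0 := by
  induction l generalizing a with
  | nil => simp
  | cons c l ih =>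
      simp only [List.foldl_cons, List.length_cons]
      rw [ih (a * 5 + codeB c), ih (0 * 5 + codeB c)]
      ring

-- entries of a left scan are folds over prefixes
lemma scanl_getD (f : Int → Char → Int) : ∀ (s : List Char) (b : Int) (i : Nat), i ≤ s.length →
    (List.scanl f b s).getD i 0 = (s.take i).foldl f b
  | s, b, 0, _ => by cases s <;> simp
  | [], b, i+1, h => by simp at h
  | c :: s, b, i+1, h => by
      rw [List.scanl_cons, List.getD_cons_succ, List.take_succ_cons, List.foldl_cons]
      exact scanl_getD f s (f b c) i (by simpa using h)

-- each prefix-hash difference is the window value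
lemma hash_diff (s : List Char) (p : Nat) (h : p + 9 ≤ s.length) :
    (prefixH s).getD (p + 9) 0 - (prefixH s).getD p 0 * 5 ^ 9 = winVal s p := by
  unfold prefixH winVal
  rw [scanl_getD _ s 0 (p + 9) h, scanl_getD _ s 0 p (by omega), List.take_add,
    List.foldl_append, foldl_base5_shift]
  have h9 : ((s.drop p).take 9).length = 9 := by
    simp only [List.length_take, List.length_drop]
    omega
  rw [h9]
  ring

-- A side: the partition loop over a suffix yields exactly the window values, step 9
lemma partitionGo_eq : ∀ (cnt : Nat) (l : List Char) (i : Int), 0 ≤ i →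
    ((l.length : Int) - i).toNat ≤ cnt →
    (partitionGo 9 l (PySem.List.pyRange i (l.length : Int) 9)).map convert_kmer_to_int
      = (PySem.List.pyRange i ((l.length : Int) - 9 + 1) 9).map (fun p => winVal l p.toNat) := by
  intro cnt
  induction cnt with
  | zero =>
      intro l i hi hc
      rw [pyRange9_nil _ _ (by omega), pyRange9_nil _ _ (by omega)]
      rfl
  | succ n ih =>
      intro l i hi hc
      by_cases hlt : (l.length : Int) ≤ i
      · rw [pyRange9_nil _ _ hlt, pyRange9_nil _ _ (by omega)]
        rfl
      · rw [pyRange9_cons _ _ (by omega : i < (l.length : Int))]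
        by_cases hbrk : i + 9 > (l.length : Int)
        · simp only [partitionGo, if_pos hbrk]
          rw [pyRange9_nil _ _ (by omega)]
          rfl
        · simp only [partitionGo, if_neg hbrk]
          rw [pyRange9_cons _ _ (by omega : i < (l.length : Int) - 9 + 1)]
          simp only [List.map_cons]
          congr 1
          · rw [PySem.List.slice_toNat _ hi (by omega),
              (by omega : (i + 9).toNat - i.toNat = 9), convert_kmer_eq]
            rfl
          · exact ih l (i + 9) (by omega) (by omega)

-- re-indexing the groups of a suffix as groups of the whole string
lemma canon_shift : ∀ (cnt : Nat) (cs : List Char) (o i : Int), 0 ≤ o → 0 ≤ i →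
    (((cs.drop o.toNat).length : Int) - i).toNat ≤ cnt →
    (PySem.List.pyRange i (((cs.drop o.toNat).length : Int) - 9 + 1) 9).map
        (fun p => winVal (cs.drop o.toNat) p.toNat)
      = (PySem.List.pyRange (o + i) ((cs.length : Int) - 9 + 1) 9).map
          (fun p => winVal cs p.toNat) := by
  intro cnt
  induction cnt with
  | zero =>
      intro cs o i ho hi hc
      have hm : (cs.drop o.toNat).length = cs.length - o.toNat := List.length_drop
      rw [pyRange9_nil _ _ (by omega), pyRange9_nil _ _ (by omega)]
      rfl
  | succ n ih =>
      intro cs o i ho hi hc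
      have hm : (cs.drop o.toNat).length = cs.length - o.toNat := List.length_drop
      by_cases h : i < ((cs.drop o.toNat).length : Int) - 9 + 1
      · rw [pyRange9_cons _ _ h, pyRange9_cons (o + i) _ (by omega)]
        simp only [List.map_cons]
        congr 1
        · unfold winVal
          rw [List.drop_drop, (by omega : o.toNat + i.toNat = (o + i).toNat)]
        · rw [(by ring : o + i + 9 = o + (i + 9))]
          exact ih cs o (i + 9) ho (by omega) (by omega)
      · rw [pyRange9_nil _ _ (by omega), pyRange9_nil (o + i) _ (by omega)]
        rfl

lemma A_side (cs : List Char) (o : Int) (ho : 0 ≤ o) :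
    kmer_processor cs o = canonGroup cs o := by
  unfold kmer_processor partitionA canonGroup
  rw [PySem.List.slice_from _ ho,
    partitionGo_eq (((cs.drop o.toNat).length : Int) - 0).toNat (cs.drop o.toNat) 0 le_rfl le_rfl]
  have h2 := canon_shift (((cs.drop o.toNat).length : Int) - 0).toNat cs o 0 ho le_rfl le_rfl
  rw [add_zero] at h2
  exact h2

lemma B_side (cs : List Char) (o : Int) (ho : 0 ≤ o) :
    (PySem.List.pyRange o ((cs.length : Int) - 9 + 1) 9).map
        (fun p => ((PySem.List.pyRange 0 ((cs.length : Int) - 9 + 1) 1).map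
          (fun p => (prefixH cs).getD (p + 9).toNat 0 - (prefixH cs).getD p.toNat 0 * 5 ^ 9)).getD
            p.toNat 0)
      = canonGroup cs o := by
  unfold canonGroup
  apply List.map_congr_left
  intro p hp
  obtain ⟨h1, h2, -⟩ := (PySem.List.mem_pyRange_iff_of_pos (by norm_num) p).mp hp
  have hp0 : 0 ≤ p := le_trans ho h1
  rw [PySem.List.pyRange_one, List.map_map,
    PySem.List.getD_map_range _ _ _ _ (by omega : p.toNat < ((cs.length : Int) - 9 + 1 - 0).toNat)]
  simp only [Function.comp]
  rw [(by omega : (0 : Int) + (p.toNat : Int) = p), (by omega : (p + 9).toNat = p.toNat + 9),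
    hash_diff cs p.toNat (by omega)]

lemma halves_eq (cs : List Char) :
    (PySem.List.pyRange 0 9 1).map (fun i => kmer_processor cs i) = groupsB cs := by
  simp only [groupsB]
  apply List.map_congr_left
  intro o hoMem
  have ho : 0 ≤ o := (PySem.List.mem_pyRange_one.mp hoMem).1
  rw [A_side cs o ho, ← B_side cs o ho]

-- ===== VERDICT (by name: the statement is the Claim_ definition above) =====
theorem get_kmers_from_seq_spec : Claim_equal_get_kmers_from_seq := by
  intro s _
  unfold Spec_get_kmers_from_seq
  simp only [get_kmers_from_seq, get_kmers_from_seq_alt, halves_eq]
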